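-- pv_equiv track=rewrite | github.com/txing-casia/Txing_LeetCode | Q1769.py | minOperations1
-- ===== SOURCE A (Python) =====
-- def minOperations1(boxes: str)  :
--     dp = [0] * len(boxes)
--     right = 0
--     for i in range(len(boxes)):
--         if boxes[i] == '1':
--             dp[0] += i
--             right += 1   # 当前及其右边的 1 的数量
--
--     left = 0
--     for j in range(1, len(boxes)):
--         if boxes[j-1] == '1':
--             left += 1
--             right -= 1
--         dp[j] = dp[j-1] - right + left
--
--     return dp
-- ===== SOURCE B (Python) =====
-- def minOperations1(boxes: str):
--     ones = [j for j, c in enumerate(boxes) if c == '1']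
--     return [sum(abs(i - j) for j in ones) for i in range(len(boxes))]
-- ===== Notes on version B (the rewrite author's own statement) =====
-- stated objective: simpler
-- what changed: B computes each answer directly as sum(|i-j|) over the collected indices of boxes containing a ball (brute-force definition of the metric), replacing A's incremental sweep that maintains left/right ones counts and a running dp recurrence.
import Mathlib
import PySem

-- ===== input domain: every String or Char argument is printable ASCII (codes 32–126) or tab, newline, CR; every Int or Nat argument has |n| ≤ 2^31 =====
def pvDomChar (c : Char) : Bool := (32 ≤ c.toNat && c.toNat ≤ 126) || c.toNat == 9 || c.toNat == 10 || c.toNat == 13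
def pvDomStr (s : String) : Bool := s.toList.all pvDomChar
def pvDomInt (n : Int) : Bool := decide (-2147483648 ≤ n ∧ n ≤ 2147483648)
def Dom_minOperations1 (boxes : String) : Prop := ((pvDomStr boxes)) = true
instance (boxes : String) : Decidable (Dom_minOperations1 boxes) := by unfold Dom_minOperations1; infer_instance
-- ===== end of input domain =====

-- B replaces A's incremental dp sweep (maintaining left/right ones counts) by the direct
-- brute-force definition: for each position i, sum of distances to the collected indices of boxes containing a ball.

-- ===== PORT A =====
-- A's index loops 'for i in range(len(boxes)): … boxes[i] …' and 'for j in range(1, n): … boxes[j-1] …'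
-- are ported as folds over exactly the characters they read, in the same order (all indices are in
-- range, so this is exact): the first over the enumerated characters, the second over cs.dropLast
-- (the chars cs[0..n-2]) with state (dp built so far in reverse, left, right); dp[j-1] is the head.
def minOperations1 (boxes : String) : List Int :=
  let cs := boxes.toList
  let fst := (PySem.List.enumerate cs).foldl
      (fun (st : Int × Int) p => if p.2 == '1' then (st.1 + p.1, st.2 + 1) else st) (0, 0)
  let snd := cs.dropLast.foldl
      (fun (st : List Int × Int × Int) c =>
        let lr := if c == '1' then (st.2.1 + 1, st.2.2 - 1) else (st.2.1, st.2.2)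
        ((st.1.headD 0 - lr.2 + lr.1) :: st.1, lr.1, lr.2))
      ([fst.1], 0, fst.2)
  if cs.isEmpty then [] else snd.1.reverse

-- ===== PORT B =====
def minOperations1_alt (boxes : String) : List Int :=
  let cs := boxes.toList
  let ones := ((PySem.List.enumerate cs).filter (fun p => p.2 == '1')).map Prod.fst
  (PySem.List.pyRange 0 cs.length 1).map (fun i => (ones.map (fun j => |i - j|)).sum)

-- ===== PRECONDITION & SPEC =====
def Spec_minOperations1 (boxes : String) (out : List Int) : Prop := out = minOperations1_alt boxes
instance (boxes : String) (out : List Int) : Decidable (Spec_minOperations1 boxes out) := by unfold Spec_minOperations1; infer_instance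

-- ===== CLAIM (what is proved, stated in full; the proofs are below) =====
def Claim_equal_minOperations1 : Prop := ∀ (boxes : String), Dom_minOperations1 boxes → Spec_minOperations1 boxes (minOperations1 boxes)

-- ===== LEMMAS AND PROOFS =====

-- the list of indices of '1' characters, as B builds it
def pvOnes (cs : List Char) : List Int :=
  ((PySem.List.enumerate cs).filter (fun p => p.2 == '1')).map Prod.fst

-- B's per-position value
def pvG (cs : List Char) (i : Int) : Int := ((pvOnes cs).map (fun j => |i - j|)).sum

lemma pvMemEnum (cs : List Char) : ∀ (s : Int) (p : Int × Char), p ∈ PySem.List.enumerate cs s ↔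
    ∃ i : Nat, ∃ h : i < cs.length, p.1 = s + i ∧ p.2 = cs[i] := by
  induction cs with
  | nil => intro s p; simp [PySem.List.enumerate_nil]
  | cons x xs ih =>
    intro s p
    simp only [PySem.List.enumerate_cons, List.mem_cons, ih]
    constructor
    · rintro (rfl | ⟨i, h, h1, h2⟩)
      · exact ⟨0, by simp, by simp, by simp⟩
      · exact ⟨i + 1, by simpa using h, by push_cast; omega, by simpa using h2⟩
    · rintro ⟨i, h, h1, h2⟩
      cases i with
      | zero => left; simp at h1 h2; cases p; simp_all
      | succ i =>
        right; exact ⟨i, by simpa using h, by push_cast at h1 ⊢; omega, by simpa using h2⟩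

lemma pvMemOnes (cs : List Char) (j : Int) : j ∈ pvOnes cs ↔
    ∃ i : Nat, ∃ h : i < cs.length, j = (i : Int) ∧ cs[i] = '1' := by
  simp only [pvOnes, List.mem_map, List.mem_filter, beq_iff_eq]
  constructor
  · rintro ⟨p, ⟨hp, h1⟩, rfl⟩
    obtain ⟨i, h, hi1, hi2⟩ := (pvMemEnum cs 0 p).mp hp
    exact ⟨i, h, by omega, by rw [← hi2]; exact h1⟩
  · rintro ⟨i, h, rfl, hc⟩
    exact ⟨((i : Int), cs[i]), ⟨(pvMemEnum cs 0 _).mpr ⟨i, h, by omega, rfl⟩, hc⟩, rfl⟩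

lemma pvOnesNodup (cs : List Char) : (pvOnes cs).Nodup := by
  have hsub : List.Sublist (((PySem.List.enumerate cs).filter (fun p => p.2 == '1')).map Prod.fst)
      ((PySem.List.enumerate cs).map Prod.fst) := List.Sublist.map Prod.fst List.filter_sublist
  have h2 : ((PySem.List.enumerate cs).map Prod.fst).Nodup := by
    rw [PySem.List.map_fst_enumerate]
    exact PySem.List.nodup_pyRange_one _ _
  exact h2.sublist hsub

-- A's first loop computes (sum of the ones indices, number of ones)
lemma pvFirstLoop (cs : List Char) :
    (PySem.List.enumerate cs).foldl
      (fun (st : Int × Int) p => if p.2 == '1' then (st.1 + p.1, st.2 + 1) else st) (0, 0)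
    = ((pvOnes cs).sum, ((pvOnes cs).length : Int)) := by
  suffices h : ∀ (l : List (Int × Char)) (a b : Int),
      l.foldl (fun (st : Int × Int) p => if p.2 == '1' then (st.1 + p.1, st.2 + 1) else st) (a, b)
      = (a + ((l.filter (fun p => p.2 == '1')).map Prod.fst).sum,
         b + ((l.filter (fun p => p.2 == '1')).length : Int)) by
    simpa [pvOnes] using h (PySem.List.enumerate cs) 0 0
  intro l
  induction l with
  | nil => intro a b; simp
  | cons x xs ih =>
    intro a b
    rw [List.foldl_cons]
    by_cases hx : x.2 = '1'
    · rw [if_pos (by simpa using hx), ih]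
      simp only [List.filter_cons, beq_iff_eq, hx, if_pos, List.map_cons, List.sum_cons,
        List.length_cons, Prod.mk.injEq]
      constructor <;> push_cast <;> ring
    · rw [if_neg (by simpa using hx), ih]
      simp [hx]

lemma pvG0 (cs : List Char) : pvG cs 0 = (pvOnes cs).sum := by
  unfold pvG
  have h : ∀ j ∈ pvOnes cs, |0 - j| = j := by
    intro j hj
    obtain ⟨i, h, rfl, -⟩ := (pvMemOnes cs j).mp hj
    simp [abs_of_nonpos]
  calc ((pvOnes cs).map (fun j => |0 - j|)).sum = ((pvOnes cs).map id).sum := by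
        apply congrArg; exact List.map_congr_left h
    _ = (pvOnes cs).sum := by simp

lemma pvCountSplit (l : List Int) (k : Int) :
    l.countP (fun j => decide (j < k + 1)) = l.countP (fun j => decide (j < k)) + l.count k := by
  induction l with
  | nil => simp
  | cons x xs ih =>
    simp only [List.countP_cons, List.count_cons, ih]
    by_cases h1 : x < k + 1 <;> by_cases h2 : x < k <;> by_cases h3 : x = k <;>
      simp [h1, h2, h3] <;> omega

-- moving the gathering point one step right changes the metric by left' - right'
lemma pvGStep (cs : List Char) (k : Int) :
    pvG cs (k + 1) = pvG cs k + ((pvOnes cs).countP (fun j => decide (j < k + 1)) : Int)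
      - (((pvOnes cs).length : Int) - ((pvOnes cs).countP (fun j => decide (j < k + 1)) : Int)) := by
  suffices h : ∀ l : List Int,
      (l.map (fun j => |k + 1 - j|)).sum
      = (l.map (fun j => |k - j|)).sum + (l.countP (fun j => decide (j < k + 1)) : Int)
        - ((l.length : Int) - (l.countP (fun j => decide (j < k + 1)) : Int)) by
    exact h (pvOnes cs)
  intro l
  induction l with
  | nil => simp
  | cons x xs ih =>
    simp only [List.map_cons, List.sum_cons, List.countP_cons, List.length_cons, ih]
    by_cases hx : x < k + 1
    · have h1 : |k + 1 - x| = k + 1 - x := abs_of_nonneg (by omega)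
      have h2 : |k - x| = k - x := abs_of_nonneg (by omega)
      simp [hx, h1, h2]; push_cast; ring
    · have h1 : |k + 1 - x| = -(k + 1 - x) := abs_of_nonpos (by omega)
      have h2 : |k - x| = -(k - x) := abs_of_nonpos (by omega)
      simp [hx, h1, h2]; push_cast; ring

lemma pvCountZero (cs : List Char) :
    (pvOnes cs).countP (fun j => decide (j < (0:Int))) = 0 := by
  rw [List.countP_eq_zero]
  intro j hj
  obtain ⟨i, h, rfl, -⟩ := (pvMemOnes cs j).mp hj
  simp

lemma pvCountK (cs : List Char) (k : Nat) (h : k < cs.length) :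
    (pvOnes cs).count ((k : Int)) = if cs[k] = '1' then 1 else 0 := by
  by_cases hc : cs[k] = '1'
  · rw [if_pos hc]
    exact List.count_eq_one_of_mem (pvOnesNodup cs) ((pvMemOnes cs _).mpr ⟨k, h, rfl, hc⟩)
  · rw [if_neg hc, List.count_eq_zero_of_not_mem]
    intro hm
    obtain ⟨i, hi, hik, hc1⟩ := (pvMemOnes cs _).mp hm
    have : i = k := by omega
    exact hc (this ▸ hc1)

-- main invariant of A's second loop: after processing boxes[0..k-1] the state is
-- (dp[0..k] reversed, #ones < k, #ones ≥ k), where dp[j] is B's value pvG cs j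
lemma pvSecondLoop (cs : List Char) (k : Nat) (hk : k ≤ cs.dropLast.length) :
    (cs.dropLast.take k).foldl
      (fun (st : List Int × Int × Int) c =>
        let lr := if c == '1' then (st.2.1 + 1, st.2.2 - 1) else (st.2.1, st.2.2)
        ((st.1.headD 0 - lr.2 + lr.1) :: st.1, lr.1, lr.2))
      ([pvG cs 0], 0, ((pvOnes cs).length : Int))
    = (((PySem.List.pyRange 0 ((k : Int) + 1) 1).reverse.map (pvG cs)),
       ((pvOnes cs).countP (fun j => decide (j < (k : Int))) : Int),
       ((pvOnes cs).length : Int) - ((pvOnes cs).countP (fun j => decide (j < (k : Int))) : Int)) := by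
  induction k with
  | zero =>
    have h01 : PySem.List.pyRange 0 1 1 = [0] := rfl
    simp [h01, pvCountZero]
  | succ k ih =>
    have hk' : k < cs.dropLast.length := by omega
    have hkc : k < cs.length := by simp at hk'; omega
    rw [List.take_succ, List.getElem?_eq_getElem hk', List.foldl_append,
        ih (by omega)]
    simp only [Option.toList_some, List.foldl_cons, List.foldl_nil, List.getElem_dropLast]
    have hcount : ((pvOnes cs).countP (fun j => decide (j < (k : Int) + 1)) : Int)
        = ((pvOnes cs).countP (fun j => decide (j < (k : Int))) : Int)
          + (if cs[k] = '1' then (1:Int) else 0) := by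
      split_ifs with h <;>
        rw [pvCountSplit (pvOnes cs) (k : Int), pvCountK cs k hkc] <;>
        simp [h]
    have hhead : ((PySem.List.pyRange 0 ((k : Int) + 1) 1).reverse.map (pvG cs)).headD 0
        = pvG cs (k : Int) := by
      rw [PySem.List.pyRange_one_succ_right (by positivity)]
      simp
    have hrange : PySem.List.pyRange 0 (((k:Nat) + 1 : Int) + 1) 1
        = PySem.List.pyRange 0 ((k : Int) + 1) 1 ++ [(k : Int) + 1] := by
      rw [PySem.List.pyRange_one_succ_right (by positivity)]
    by_cases hc : cs[k] = '1'
    · simp only [hc, beq_self_eq_true, if_pos, Prod.mk.injEq]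
      refine ⟨?_, ?_, ?_⟩
      · rw [hhead]
        push_cast
        rw [hrange]
        simp only [List.reverse_append, List.map_append, List.map_cons, List.map_nil,
          List.reverse_cons, List.reverse_nil, List.nil_append, List.cons_append,
          List.singleton_append, List.map_reverse]
        congr 1
        have h1 : ((pvOnes cs).countP (fun j => decide (j < (k:Int) + 1)) : Int)
            = ((pvOnes cs).countP (fun j => decide (j < (k : Int))) : Int) + 1 := by
          rw [hcount, if_pos hc]
        rw [pvGStep cs (k : Int), h1]; ring
      · push_cast
        rw [hcount, if_pos hc]
      · push_cast
        rw [hcount, if_pos hc]; ring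
    · have hb : (cs[k] == '1') = false := by simp [hc]
      simp only [hb, Bool.false_eq_true, if_neg, Prod.mk.injEq]
      have h1 : ((pvOnes cs).countP (fun j => decide (j < (k:Int) + 1)) : Int)
          = ((pvOnes cs).countP (fun j => decide (j < (k : Int))) : Int) := by
        rw [hcount, if_neg hc]; ring
      refine ⟨?_, ?_, ?_⟩
      · rw [hhead]
        push_cast
        rw [hrange]
        simp only [List.reverse_append, List.map_append, List.map_cons, List.map_nil,
          List.reverse_cons, List.reverse_nil, List.nil_append, List.cons_append,
          List.singleton_append, List.map_reverse]
        congr 1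
        rw [pvGStep cs (k : Int), h1]; ring
      · push_cast
        rw [h1]
      · push_cast
        rw [h1]

lemma pvMain (boxes : String) : minOperations1 boxes = minOperations1_alt boxes := by
  unfold minOperations1 minOperations1_alt
  simp only []
  rcases eq_or_ne boxes.toList [] with hnil | hne
  · rw [hnil]
    rfl
  · set cs := boxes.toList with hcs
    have hlen : 1 ≤ cs.length := List.length_pos_of_ne_nil hne
    rw [pvFirstLoop]
    have hEmpty : cs.isEmpty = false := by simpa [List.isEmpty_iff] using hne
    rw [hEmpty]
    simp only [Bool.false_eq_true, if_neg, ite_false]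
    have hfold := pvSecondLoop cs cs.dropLast.length le_rfl
    rw [List.take_length] at hfold
    have hbound : ((cs.dropLast.length : Nat) : Int) + 1 = (cs.length : Int) := by
      simp [List.length_dropLast]
      omega
    have hsum : [((pvOnes cs).sum, ((pvOnes cs).length : Int)).1] = [pvG cs 0] := by
      simp [pvG0]
    rw [hsum, hfold, hbound]
    simp [List.map_reverse, pvG, pvOnes]

-- ===== VERDICT (by name: the statement is the Claim_ definition above) =====
theorem minOperations1_spec : Claim_equal_minOperations1 := by
  intro boxes _
  exact pvMain boxes
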